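-- pv_equiv track=rewrite | github.com/jenniferbe/advent_of_code | 2022/day_08/solution.py | is_visible_from_left
-- ===== SOURCE A (Python) =====
-- def is_visible_from_left(grid):
--     visible = set()
--     for y in range(len(grid)):
--         max_height = -1
--         for x in range(len(grid[0])):
--             height = grid[y][x]
--             if height > max_height:
--                 visible.add((x, y))
--                 max_height = height
--     return visible
-- ===== SOURCE B (Python) =====
-- def is_visible_from_left(grid):
--     # Per-cell prefix-maximum formulation: a cell is visible iff it is strictly
--     # taller than everything to its left (with the -1 sentinel in the pool).
--     return {(x, y)
--             for y, row in enumerate(grid)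
--             for x in range(len(grid[0]))
--             if row[x] > max([-1] + row[:x])}
-- ===== Notes on version B (the rewrite author's own statement) =====
-- stated objective: alternative
-- what changed: Replaces the stateful running-max accumulator pass with a single set comprehension that tests each cell independently against the maximum of its left prefix (max([-1]+row[:x])).
import Mathlib
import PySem

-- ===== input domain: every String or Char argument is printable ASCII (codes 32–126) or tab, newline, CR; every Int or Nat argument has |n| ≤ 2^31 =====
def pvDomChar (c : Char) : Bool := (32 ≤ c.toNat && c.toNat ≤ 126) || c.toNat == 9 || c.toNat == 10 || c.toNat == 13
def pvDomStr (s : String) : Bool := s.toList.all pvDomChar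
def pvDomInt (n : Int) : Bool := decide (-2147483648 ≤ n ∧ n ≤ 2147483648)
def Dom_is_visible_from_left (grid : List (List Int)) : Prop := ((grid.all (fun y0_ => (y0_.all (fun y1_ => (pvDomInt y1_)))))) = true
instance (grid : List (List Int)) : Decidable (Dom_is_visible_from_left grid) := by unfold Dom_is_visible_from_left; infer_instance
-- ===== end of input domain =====

-- B replaces A's running-max accumulator pass by an independent per-cell
-- test against the maximum of the cell's left prefix (same result, no state).

-- ===== PORT A =====
def is_visible_from_left (grid : List (List Int)) : List (Int × Int) :=
  (PySem.List.pyRange 0 grid.length 1).foldl (fun (visible : PySem.Set (Int × Int)) y =>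
    ((PySem.List.pyRange 0 ((PySem.List.pyGetD grid 0 []).length : Int) 1).foldl
      (fun (st : PySem.Set (Int × Int) × Int) x =>
        let height := PySem.List.pyGetD (PySem.List.pyGetD grid y []) x 0
        if height > st.2 then (PySem.Set.add st.1 (x, y), height) else st)
      (visible, -1)).1)
    PySem.Set.empty

-- ===== PORT B =====
-- max([-1] + row[:x])
def pvLeftMax (row : List Int) (x : Int) : Int :=
  (PySem.List.max? ((-1) :: PySem.List.slice row none (some x)) (fun v => v)).getD 0

def is_visible_from_left_alt (grid : List (List Int)) : List (Int × Int) :=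
  (PySem.List.enumerate grid 0).foldl (fun (acc : PySem.Set (Int × Int)) yr =>
    (PySem.List.pyRange 0 ((PySem.List.pyGetD grid 0 []).length : Int) 1).foldl
      (fun acc x =>
        if PySem.List.pyGetD yr.2 x 0 > pvLeftMax yr.2 x
        then PySem.Set.add acc (x, yr.1) else acc) acc)
    PySem.Set.empty

-- ===== PRECONDITION & SPEC =====
-- Pre_ excludes exactly the ragged grids on which some row is shorter than row 0:
-- there A (and B) raise IndexError at grid[y][x].
def Pre_is_visible_from_left (grid : List (List Int)) : Prop :=
  ∀ row ∈ grid, (grid.headD []).length ≤ row.length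
instance (grid : List (List Int)) : Decidable (Pre_is_visible_from_left grid) := by
  unfold Pre_is_visible_from_left; infer_instance

def pvWitness_is_visible_from_left : List (List Int) := [[3, 0, 3], [2, 5, 5], [6, 5, 3]]

def Spec_is_visible_from_left (grid : List (List Int)) (out : List (Int × Int)) : Prop := out = is_visible_from_left_alt grid
instance (grid : List (List Int)) (out : List (Int × Int)) : Decidable (Spec_is_visible_from_left grid out) := by unfold Spec_is_visible_from_left; infer_instance

-- ===== CLAIM (what is proved, stated in full; the proofs are below) =====
def Claim_equal_is_visible_from_left : Prop := ∀ (grid : List (List Int)), Dom_is_visible_from_left grid → Pre_is_visible_from_left grid → Spec_is_visible_from_left grid (is_visible_from_left grid)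

-- ===== LEMMAS AND PROOFS =====

-- running prefix maximum of the first n cells, seeded with the -1 sentinel
def pvPm (row : List Int) (n : Nat) : Int := (row.take n).foldl max (-1)

theorem pvLeftMax_eq (row : List Int) (n : Nat) :
    pvLeftMax row (n : Int) = pvPm row n := by
  unfold pvLeftMax pvPm
  rw [PySem.List.slice_to_natCast]
  cases h : row.take n with
  | nil => simp [PySem.List.max?]
  | cons a t =>
    rw [PySem.List.max?_id_cons, Option.getD_some]

theorem pvInner (row : List Int) (y : Int) (n : Nat) (hn : n ≤ row.length)
    (s : PySem.Set (Int × Int)) :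
    (PySem.List.pyRange 0 (n : Int) 1).foldl
      (fun (st : PySem.Set (Int × Int) × Int) x =>
        let height := PySem.List.pyGetD row x 0
        if height > st.2 then (PySem.Set.add st.1 (x, y), height) else st)
      (s, -1)
    = ((PySem.List.pyRange 0 (n : Int) 1).foldl
        (fun acc x =>
          if PySem.List.pyGetD row x 0 > pvLeftMax row x
          then PySem.Set.add acc (x, y) else acc) s,
       pvPm row n) := by
  induction n with
  | zero => simp [PySem.List.pyRange_one_eq_nil, pvPm]
  | succ k ih =>
    have hk : k < row.length := hn
    have hsplit : PySem.List.pyRange 0 ((k + 1 : Nat) : Int) 1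
        = PySem.List.pyRange 0 (k : Int) 1 ++ [(k : Int)] := by
      push_cast
      exact PySem.List.pyRange_one_succ_right (by positivity)
    rw [hsplit, List.foldl_append, List.foldl_append, ih (Nat.le_of_succ_le hn)]
    have hget : PySem.List.pyGetD row (k : Int) 0 = row[k] :=
      PySem.List.pyGetD_ofNat row k 0 hk
    have hpm : pvPm row (k + 1) = max (pvPm row k) row[k] := by
      unfold pvPm
      rw [List.take_add_one, List.getElem?_eq_getElem hk, Option.toList_some,
        List.foldl_append, List.foldl_cons, List.foldl_nil]
    simp only [List.foldl_cons, List.foldl_nil, hget, pvLeftMax_eq]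
    by_cases hc : row[k] > pvPm row k
    · simp [hc, hpm, max_eq_right (le_of_lt hc)]
    · simp [hc, hpm, max_eq_left (le_of_not_gt hc)]

theorem pvOuter (grid : List (List Int)) (hpre : Pre_is_visible_from_left grid) :
    is_visible_from_left grid = is_visible_from_left_alt grid := by
  unfold is_visible_from_left is_visible_from_left_alt
  rw [PySem.List.enumerate_eq_map_pyRange (xs := grid) (d := ([] : List Int)), List.foldl_map]
  apply PySem.List.foldl_congr_mem
  intro acc y hy
  have hy' := (PySem.List.mem_pyRange_one).1 hy
  have hrow : PySem.List.pyGetD grid y [] ∈ grid := by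
    apply PySem.List.pyGetD_mem
    constructor <;> omega
  have hlen : (PySem.List.pyGetD grid 0 []).length
      ≤ (PySem.List.pyGetD grid y []).length := by
    have h0 : PySem.List.pyGetD grid 0 [] = grid.headD [] := by
      cases grid with
      | nil => rfl
      | cons a t => rw [PySem.List.pyGetD_zero_cons]; rfl
    rw [h0]
    exact hpre _ hrow
  have := pvInner (PySem.List.pyGetD grid y []) y
    (PySem.List.pyGetD grid 0 []).length hlen acc
  rw [this]

-- ===== VERDICT (by name: the statement is the Claim_ definition above) =====
theorem is_visible_from_left_spec : Claim_equal_is_visible_from_left := by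
  intro grid _ hpre
  unfold Spec_is_visible_from_left
  exact pvOuter grid hpre
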